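-- pv_equiv track=rewrite | github.com/bankielewicz/DevForgeAI | tests/user-input-guidance/utils.py | count_numbered_items
-- ===== SOURCE A (Python) =====
-- def count_numbered_items(text: str, max_num: int = 10) -> int:
--     """
--     Count numbered list items in text (1. 2. 3. etc).
--
--     Args:
--         text: Text to search
--         max_num: Maximum number to check for
--
--     Returns:
--         Count of consecutive numbered items found
--     """
--     count = 0
--     for i in range(1, max_num + 1):
--         if f'\n{i}. ' in text or f'\n{i}) ' in text:
--             count += 1
--         else:
--             break  # Stop at first gap
--
--     return count
-- ===== SOURCE B (Python) =====
-- def count_numbered_items(text: str, max_num: int = 10) -> int: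
--     """Single scan of text collecting the digit-run markers that follow a
--     newline ("\\n<digits><. or )> "), then count i = 1, 2, ... consecutively
--     while str(i) is among the collected markers."""
--     marks = set()
--     n = len(text)
--     for j in range(n):
--         if text[j] == '\n':
--             k = j + 1
--             while k < n and text[k].isdigit():
--                 k += 1
--             if k + 1 < n and text[k] in '.)' and text[k + 1] == ' ':
--                 marks.add(text[j + 1:k])
--     count = 0
--     i = 1
--     while i <= max_num and str(i) in marks:
--         count += 1
--         i += 1
--     return count
-- ===== Notes on version B (the rewrite author's own statement) =====
-- stated objective: alternative
-- what changed: A rescans the whole text with two substring searches for every i in 1..max_num; B makes one pass over the text collecting all newline-prefixed numbered markers into a set, then counts consecutively from 1 by set membership.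
import Mathlib
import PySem

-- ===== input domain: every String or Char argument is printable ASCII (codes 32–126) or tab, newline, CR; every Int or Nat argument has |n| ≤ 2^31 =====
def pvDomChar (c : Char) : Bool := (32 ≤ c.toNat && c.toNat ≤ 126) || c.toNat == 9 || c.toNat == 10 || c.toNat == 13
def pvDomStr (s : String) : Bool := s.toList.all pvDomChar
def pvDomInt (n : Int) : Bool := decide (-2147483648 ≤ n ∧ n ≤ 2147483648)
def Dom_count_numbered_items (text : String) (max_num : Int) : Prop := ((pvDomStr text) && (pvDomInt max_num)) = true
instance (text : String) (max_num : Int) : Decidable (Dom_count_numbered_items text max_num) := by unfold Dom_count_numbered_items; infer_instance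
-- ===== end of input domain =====

-- B replaces A's repeated substring searches (one pair of scans of `text` per counted number i)
-- by ONE scan of `text` that collects every newline-prefixed numbered marker into a set,
-- followed by a consecutive-from-1 membership check (objective: alternative algorithm).

-- ===== PORT A =====
-- the for-loop over range(1, max_num+1) with its early break
def pvALoop (l : List Char) : List Int → Int → Int
  | [], count => count
  | i :: rest, count =>
    if PySem.Chars.isIn ('\n' :: PySem.Int.toChars i ++ ['.', ' ']) l
        || PySem.Chars.isIn ('\n' :: PySem.Int.toChars i ++ [')', ' ']) l then
      pvALoop l rest (count + 1)
    else count

def count_numbered_items (text : String) (max_num : Int) : Int :=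
  pvALoop text.toList (PySem.List.pyRange 1 (max_num + 1) 1) 0

-- ===== PORT B =====
-- the inner while-loop of Source B: the maximal digit run and what follows it
def pvRun : List Char → List Char × List Char
  | [] => ([], [])
  | c :: rest =>
    if PySem.Chars.isdigit c then
      let p := pvRun rest
      (c :: p.1, p.2)
    else ([], c :: rest)

-- Source B's test after a '\n': digit run followed by '.' or ')' and then a space
def pvParse (r : List Char) : Option (List Char) :=
  match pvRun r with
  | (ds, sep :: c2 :: _) =>
    if (sep = '.' ∨ sep = ')') ∧ c2 = ' ' then some ds else none
  | _ => none

-- Source B's `for j in range(n)` scan building the set `marks`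
def pvScanGo (acc : PySem.Set (List Char)) : List Char → PySem.Set (List Char)
  | [] => acc
  | c :: rest =>
    pvScanGo
      (if c = '\n' then
        match pvParse rest with
        | some ds => PySem.Set.add acc ds
        | none => acc
      else acc) rest

-- Source B's final while-loop counting consecutive members
def pvBLoop (marks : PySem.Set (List Char)) (max_num : Int) (i : Int) (count : Int) : Int :=
  if i ≤ max_num ∧ PySem.Int.toChars i ∈ marks then
    pvBLoop marks max_num (i + 1) (count + 1)
  else count
termination_by (max_num + 1 - i).toNat
decreasing_by omega

def count_numbered_items_alt (text : String) (max_num : Int) : Int :=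
  pvBLoop (pvScanGo PySem.Set.empty text.toList) max_num 1 0

-- ===== PRECONDITION & SPEC =====
def Spec_count_numbered_items (text : String) (max_num : Int) (out : Int) : Prop := out = count_numbered_items_alt text max_num
instance (text : String) (max_num : Int) (out : Int) : Decidable (Spec_count_numbered_items text max_num out) := by unfold Spec_count_numbered_items; infer_instance

-- ===== CLAIM (what is proved, stated in full; the proofs are below) =====
def Claim_equal_count_numbered_items : Prop := ∀ (text : String) (max_num : Int), Dom_count_numbered_items text max_num → Spec_count_numbered_items text max_num (count_numbered_items text max_num)

-- ===== LEMMAS AND PROOFS =====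

-- every character produced by Nat.toDigitsCore base 10 is an ASCII digit
theorem pv_toDigitsCore_digits (f : Nat) : ∀ (n : Nat) (acc : List Char),
    (∀ c ∈ acc, PySem.Chars.isdigit c = true) →
    ∀ c ∈ Nat.toDigitsCore 10 f n acc, PySem.Chars.isdigit c = true := by
  induction f with
  | zero => intro n acc hacc c hc; exact hacc c hc
  | succ f ih =>
    intro n acc hacc c hc
    have hd : PySem.Chars.isdigit (Nat.digitChar (n % 10)) = true := by
      have h10 : n % 10 < 10 := Nat.mod_lt _ (by omega)
      interval_cases h : (n % 10) <;> decide
    simp only [Nat.toDigitsCore] at hc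
    by_cases hz : n / 10 = 0
    · simp only [hz, if_true] at hc
      rcases List.mem_cons.mp hc with h | h
      · exact h ▸ hd
      · exact hacc c h
    · simp only [hz, if_false] at hc
      refine ih (n / 10) _ ?_ c hc
      intro c' hc'
      rcases List.mem_cons.mp hc' with h | h
      · exact h ▸ hd
      · exact hacc c' h

theorem pv_toChars_digits (i : Int) (hi : 0 ≤ i) :
    ∀ c ∈ PySem.Int.toChars i, PySem.Chars.isdigit c = true := by
  simp only [PySem.Int.toChars, if_neg (not_lt.mpr hi)]
  exact pv_toDigitsCore_digits _ _ [] (by simp)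

-- pvRun splits its argument
theorem pvRun_append (r ds t : List Char) (h : pvRun r = (ds, t)) : r = ds ++ t := by
  induction r generalizing ds with
  | nil =>
    simp only [pvRun] at h
    obtain ⟨rfl, rfl⟩ := Prod.mk.injEq .. ▸ h |> (by simpa using ·)
    rfl
  | cons c rest ih =>
    by_cases hc : PySem.Chars.isdigit c = true
    · simp only [pvRun, hc, if_true] at h
      cases h' : pvRun rest with
      | mk ds' t' =>
        rw [h'] at h
        cases h
        simpa using ih ds' h'
    · simp only [pvRun, hc] at h
      cases h
      simp

-- pvRun on an all-digit prefix followed by a non-digit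
theorem pvRun_digits_prefix (ds t : List Char)
    (hds : ∀ c ∈ ds, PySem.Chars.isdigit c = true)
    (ht : ∀ c, t = c :: t.tail → PySem.Chars.isdigit c = false) :
    pvRun (ds ++ t) = (ds, t) := by
  induction ds with
  | nil =>
    cases t with
    | nil => simp [pvRun]
    | cons c tt => simp [pvRun, ht c rfl]
  | cons d ds' ih =>
    have hd := hds d (List.mem_cons_self ..)
    simp only [List.cons_append, pvRun, hd, if_true]
    rw [ih (fun c hc => hds c (List.mem_cons_of_mem _ hc))]

-- membership in the scanned set: exactly the parses at some '\n'
theorem mem_pvScanGo (x : List Char) : ∀ (l : List Char) (acc : PySem.Set (List Char)),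
    x ∈ pvScanGo acc l ↔ x ∈ acc ∨ ∃ r, ('\n' :: r) <:+ l ∧ pvParse r = some x := by
  intro l
  induction l with
  | nil =>
    intro acc
    simp [pvScanGo]
  | cons c rest ih =>
    intro acc
    simp only [pvScanGo]
    rw [ih]
    constructor
    · rintro (hacc | ⟨r, hr, hp⟩)
      · by_cases hc : c = '\n'
        · subst hc
          cases hps : pvParse rest with
          | none =>
            rw [if_pos rfl, hps] at hacc
            exact Or.inl hacc
          | some ds =>
            rw [if_pos rfl, hps] at hacc
            rcases (PySem.Set.mem_add acc ds x).mp hacc with h | h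
            · exact Or.inl h
            · exact Or.inr ⟨rest, List.suffix_refl _, h ▸ hps⟩
        · rw [if_neg hc] at hacc
          exact Or.inl hacc
      · exact Or.inr ⟨r, hr.trans (List.suffix_cons _ _), hp⟩
    · rintro (hacc | ⟨r, hr, hp⟩)
      · left
        by_cases hc : c = '\n'
        · subst hc
          cases hps : pvParse rest with
          | none => rw [if_pos rfl]; exact hacc
          | some ds =>
            rw [if_pos rfl]
            exact (PySem.Set.mem_add acc ds x).mpr (Or.inl hacc)
        · rw [if_neg hc]; exact hacc
      · rcases List.suffix_cons_iff.mp hr with h | h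
        · injection h with h1 h2
          subst h2
          left
          rw [if_pos h1.symm, hp]
          exact (PySem.Set.mem_add acc x x).mpr (Or.inr rfl)
        · exact Or.inr ⟨r, h, hp⟩

-- A's membership test for i equals B's set membership, for 0 ≤ i
theorem pv_present_iff (l : List Char) (i : Int) (hi : 0 ≤ i) :
    ((PySem.Chars.isIn ('\n' :: PySem.Int.toChars i ++ ['.', ' ']) l
      || PySem.Chars.isIn ('\n' :: PySem.Int.toChars i ++ [')', ' ']) l) = true)
    ↔ PySem.Int.toChars i ∈ pvScanGo PySem.Set.empty l := by
  rw [Bool.or_eq_true, PySem.Chars.isIn_iff_infix, PySem.Chars.isIn_iff_infix,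
      mem_pvScanGo]
  have hdig := pv_toChars_digits i hi
  constructor
  · rintro (h | h)
    · rcases List.infix_iff_prefix_suffix.mp h with ⟨t, ⟨b, hb⟩, hsuf⟩
      subst hb
      refine Or.inr ⟨PySem.Int.toChars i ++ '.' :: ' ' :: b, by simpa using hsuf, ?_⟩
      unfold pvParse
      rw [pvRun_digits_prefix _ _ hdig
        (by intro c hc; injection hc with h1 _; exact h1 ▸ by decide)]
      simp
    · rcases List.infix_iff_prefix_suffix.mp h with ⟨t, ⟨b, hb⟩, hsuf⟩
      subst hb
      refine Or.inr ⟨PySem.Int.toChars i ++ ')' :: ' ' :: b, by simpa using hsuf, ?_⟩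
      unfold pvParse
      rw [pvRun_digits_prefix _ _ hdig
        (by intro c hc; injection hc with h1 _; exact h1 ▸ by decide)]
      simp
  · rintro (h | ⟨r, hsuf, hp⟩)
    · exact absurd h (by simp [PySem.Set.empty])
    · unfold pvParse at hp
      rcases hrun : pvRun r with ⟨ds, t⟩
      rw [hrun] at hp
      have hr := pvRun_append r ds t hrun
      subst hr
      split at hp
      · rename_i ds' sep c2 tail heq
        injection heq with heq1 heq2
        subst heq1
        subst heq2
        split at hp
        · rename_i hcond
          injection hp with hds
          subst hds
          obtain ⟨hsep, rfl⟩ := hcond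
          rcases hsep with rfl | rfl
          · refine Or.inl (List.infix_iff_prefix_suffix.mpr
              ⟨'\n' :: (PySem.Int.toChars i ++ '.' :: ' ' :: tail), ?_, hsuf⟩)
            simp
          · refine Or.inr (List.infix_iff_prefix_suffix.mpr
              ⟨'\n' :: (PySem.Int.toChars i ++ ')' :: ' ' :: tail), ?_, hsuf⟩)
            simp
        · simp at hp
      · simp at hp

-- the two loops agree from any start index i ≥ 1
theorem pv_loops_eq (l : List Char) (max_num : Int) :
    ∀ (fuel : Nat) (i count : Int), 1 ≤ i → (max_num + 1 - i).toNat ≤ fuel →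
    pvALoop l (PySem.List.pyRange i (max_num + 1) 1) count
      = pvBLoop (pvScanGo PySem.Set.empty l) max_num i count := by
  intro fuel
  induction fuel with
  | zero =>
    intro i count hi hf
    have hle : max_num + 1 ≤ i := by omega
    rw [PySem.List.pyRange_one_eq_nil hle, pvBLoop]
    simp only [pvALoop]
    rw [if_neg (by omega : ¬ (i ≤ max_num ∧ _))]
  | succ fuel ih =>
    intro i count hi hf
    by_cases hlt : i < max_num + 1
    · rw [PySem.List.pyRange_one_cons hlt, pvBLoop]
      simp only [pvALoop]
      by_cases hmem : PySem.Int.toChars i ∈ pvScanGo PySem.Set.empty l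
      · rw [if_pos ((pv_present_iff l i (by omega)).mpr hmem),
            if_pos ⟨by omega, hmem⟩]
        exact ih (i + 1) (count + 1) (by omega) (by omega)
      · rw [if_neg (fun h => hmem ((pv_present_iff l i (by omega)).mp h)),
            if_neg (by tauto)]
    · have hle : max_num + 1 ≤ i := by omega
      rw [PySem.List.pyRange_one_eq_nil hle, pvBLoop]
      simp only [pvALoop]
      rw [if_neg (by omega : ¬ (i ≤ max_num ∧ _))]

-- ===== VERDICT (by name: the statement is the Claim_ definition above) =====
theorem count_numbered_items_spec : Claim_equal_count_numbered_items := by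
  intro text max_num _
  unfold Spec_count_numbered_items count_numbered_items count_numbered_items_alt
  exact pv_loops_eq text.toList max_num (max_num + 1 - 1).toNat 1 0 (le_refl 1) (le_refl _)
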